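-- pv_equiv track=rewrite | github.com/dimitroffangel/AdventOfCode2024 | Day7/day7.2.py | concantenate_numbers
-- ===== SOURCE A (Python) =====
-- def concantenate_numbers(lhs_number, rhs_number):
--     if rhs_number == 0:
--         return lhs_number * 10
--
--     x = lhs_number
--     a = rhs_number
--
--     reversed_rhs_number = 0
--     number_of_final_zeroes = 0
--     is_divisible_by_zero = rhs_number % 10 == 0
--     while rhs_number != 0:
--         reversed_rhs_number = reversed_rhs_number * 10 + rhs_number % 10
--         is_divisible_by_zero = is_divisible_by_zero and rhs_number % 10 == 0
--         if is_divisible_by_zero: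
--             number_of_final_zeroes = number_of_final_zeroes + int(rhs_number % 10 == 0)
--         rhs_number = rhs_number // 10
--
--     b = reversed_rhs_number
--
--     while reversed_rhs_number != 0:
--         lhs_number = lhs_number * 10 + reversed_rhs_number % 10
--         reversed_rhs_number = reversed_rhs_number // 10
--
--     lhs_number = lhs_number * pow(10, number_of_final_zeroes)
--
--     return lhs_number
-- ===== SOURCE B (Python) =====
-- def concantenate_numbers(lhs_number, rhs_number):
--     # closed form: shift lhs past rhs's digit count, then add rhs
--     d = 1
--     n = rhs_number
--     while n >= 10:
--         n //= 10
--         d += 1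
--     return lhs_number * 10 ** d + rhs_number
-- ===== Notes on version B (the rewrite author's own statement) =====
-- stated objective: simpler
-- what changed: Replaces A's digit-reversal loop, digit-replay loop and trailing-zero bookkeeping with one digit-count loop and the closed form lhs*10**d + rhs.
import Mathlib
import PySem

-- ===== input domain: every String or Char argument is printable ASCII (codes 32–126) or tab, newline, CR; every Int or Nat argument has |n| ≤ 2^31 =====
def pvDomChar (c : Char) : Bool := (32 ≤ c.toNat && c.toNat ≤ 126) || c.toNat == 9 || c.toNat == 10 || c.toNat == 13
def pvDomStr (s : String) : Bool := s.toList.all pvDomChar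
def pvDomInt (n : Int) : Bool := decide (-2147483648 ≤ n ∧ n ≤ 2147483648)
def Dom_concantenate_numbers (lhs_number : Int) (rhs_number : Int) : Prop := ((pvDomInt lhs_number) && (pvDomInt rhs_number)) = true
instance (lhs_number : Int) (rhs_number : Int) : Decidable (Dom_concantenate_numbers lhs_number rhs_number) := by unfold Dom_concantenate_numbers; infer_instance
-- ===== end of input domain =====

-- B replaces A's digit-reversal loop + digit-replay loop + trailing-zero bookkeeping with a
-- single digit-count loop and the closed form lhs * 10^d + rhs (objective: simpler).
-- Each Python 'while' is ported as structural recursion on a fuel argument; the entry points pass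
-- fuel (= |loop variable| + 1) strictly exceeding the number of iterations of the terminating
-- Python runs, so the ports compute exactly what Python computes wherever Python returns.

-- ===== PORT A =====
-- first while loop of A: state (reversed_rhs_number, number_of_final_zeroes, is_divisible_by_zero)
def pvRevLoopA : Nat → Int → Int → Int → Bool → Int × Int
  | 0, _, rev, zeros, _ => (rev, zeros)
  | fuel + 1, rhs_number, rev, zeros, isdiv =>
    if rhs_number = 0 then (rev, zeros)
    else
      let d := PySem.Int.mod rhs_number 10
      let isdiv' := isdiv && decide (d = 0)
      pvRevLoopA fuel (PySem.Int.floordiv rhs_number 10) (rev * 10 + d)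
        (if isdiv' then zeros + (if d = 0 then 1 else 0) else zeros) isdiv'

-- second while loop of A: replay the reversed digits onto lhs_number
def pvUnrevLoopA : Nat → Int → Int → Int
  | 0, lhs_number, _ => lhs_number
  | fuel + 1, lhs_number, rev =>
    if rev = 0 then lhs_number
    else pvUnrevLoopA fuel (lhs_number * 10 + PySem.Int.mod rev 10) (PySem.Int.floordiv rev 10)

def concantenate_numbers (lhs_number : Int) (rhs_number : Int) : Int :=
  if rhs_number = 0 then lhs_number * 10
  else
    let p := pvRevLoopA (rhs_number.toNat + 1) rhs_number 0 0 (decide (PySem.Int.mod rhs_number 10 = 0))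
    (pvUnrevLoopA (p.1.toNat + 1) lhs_number p.1) * 10 ^ p.2.toNat

-- ===== PORT B =====
-- B's digit-count loop: state (n, d)
def pvCntLoopB : Nat → Int → Int → Int
  | 0, _, d => d
  | fuel + 1, n, d =>
    if n < 10 then d
    else pvCntLoopB fuel (PySem.Int.floordiv n 10) (d + 1)

def concantenate_numbers_alt (lhs_number : Int) (rhs_number : Int) : Int :=
  lhs_number * 10 ^ (pvCntLoopB (rhs_number.toNat + 1) rhs_number 1).toNat + rhs_number

-- ===== PRECONDITION & SPEC =====
-- Pre_ excludes rhs_number < 0, on which Python A never returns (its first while loop diverges: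
-- rhs_number // 10 stalls at -1).
def Pre_concantenate_numbers (lhs_number : Int) (rhs_number : Int) : Prop := 0 ≤ rhs_number
instance (lhs_number : Int) (rhs_number : Int) : Decidable (Pre_concantenate_numbers lhs_number rhs_number) := by unfold Pre_concantenate_numbers; infer_instance
def pvWitness_concantenate_numbers : Int × Int := (17, 120)

def Spec_concantenate_numbers (lhs_number : Int) (rhs_number : Int) (out : Int) : Prop := out = concantenate_numbers_alt lhs_number rhs_number
instance (lhs_number : Int) (rhs_number : Int) (out : Int) : Decidable (Spec_concantenate_numbers lhs_number rhs_number out) := by unfold Spec_concantenate_numbers; infer_instance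

-- ===== CLAIM (what is proved, stated in full; the proofs are below) =====
def Claim_equal_concantenate_numbers : Prop := ∀ (lhs_number : Int) (rhs_number : Int), Dom_concantenate_numbers lhs_number rhs_number → Pre_concantenate_numbers lhs_number rhs_number → Spec_concantenate_numbers lhs_number rhs_number (concantenate_numbers lhs_number rhs_number)

-- ===== LEMMAS AND PROOFS =====

-- proof-side fuel-free versions of the three loops (well-founded recursion on |n|)
theorem pvDiv10Lt (n : Int) (h : 0 < n) : (PySem.Int.floordiv n 10).toNat < n.toNat := by
  rw [PySem.Int.floordiv_eq_ediv_of_pos (by decide : (0:Int) < 10)]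
  omega

def pvRevW (rhs rev zeros : Int) (isdiv : Bool) : Int × Int :=
  if rhs ≤ 0 then (rev, zeros)
  else
    let d := PySem.Int.mod rhs 10
    let isdiv' := isdiv && decide (d = 0)
    pvRevW (PySem.Int.floordiv rhs 10) (rev * 10 + d)
      (if isdiv' then zeros + (if d = 0 then 1 else 0) else zeros) isdiv'
termination_by rhs.toNat
decreasing_by exact pvDiv10Lt _ (by omega)

def pvUnrevW (lhs rev : Int) : Int :=
  if rev ≤ 0 then lhs
  else pvUnrevW (lhs * 10 + PySem.Int.mod rev 10) (PySem.Int.floordiv rev 10)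
termination_by rev.toNat
decreasing_by exact pvDiv10Lt _ (by omega)

def pvCntW (n d : Int) : Int :=
  if n < 10 then d
  else pvCntW (PySem.Int.floordiv n 10) (d + 1)
termination_by n.toNat
decreasing_by exact pvDiv10Lt _ (by omega)

-- fuel adequacy: with 0 ≤ n and n.toNat < fuel the fueled loops equal the fuel-free ones
lemma pvRevLoopA_eq_W (fuel : Nat) : ∀ (n rev z : Int) (b : Bool), 0 ≤ n → n.toNat < fuel →
    pvRevLoopA fuel n rev z b = pvRevW n rev z b := by
  induction fuel with
  | zero => intro n rev z b _ hf; omega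
  | succ fuel ih =>
    intro n rev z b hn _
    rw [pvRevLoopA, pvRevW]
    by_cases h0 : n = 0
    · simp [h0]
    · have hpos : 0 < n := by omega
      have hfd : PySem.Int.floordiv n 10 = n / 10 := PySem.Int.floordiv_eq_ediv_of_pos (by omega)
      simp only [h0, if_false, if_neg (by omega : ¬ n ≤ 0)]
      rw [ih _ _ _ _ (by rw [hfd]; positivity)
        (by have := pvDiv10Lt n hpos; omega)]

lemma pvUnrevLoopA_eq_W (fuel : Nat) : ∀ (lhs rev : Int), 0 ≤ rev → rev.toNat < fuel →
    pvUnrevLoopA fuel lhs rev = pvUnrevW lhs rev := by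
  induction fuel with
  | zero => intro lhs rev _ hf; omega
  | succ fuel ih =>
    intro lhs rev hr _
    rw [pvUnrevLoopA, pvUnrevW]
    by_cases h0 : rev = 0
    · simp [h0]
    · have hpos : 0 < rev := by omega
      have hfd : PySem.Int.floordiv rev 10 = rev / 10 := PySem.Int.floordiv_eq_ediv_of_pos (by omega)
      simp only [h0, if_false, if_neg (by omega : ¬ rev ≤ 0)]
      rw [ih _ _ (by rw [hfd]; positivity) (by have := pvDiv10Lt rev hpos; omega)]

lemma pvCntLoopB_eq_W (fuel : Nat) : ∀ (n d : Int), 0 ≤ n → n.toNat < fuel →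
    pvCntLoopB fuel n d = pvCntW n d := by
  induction fuel with
  | zero => intro n d _ hf; omega
  | succ fuel ih =>
    intro n d hn _
    rw [pvCntLoopB, pvCntW]
    by_cases h : n < 10
    · simp [h]
    · have hpos : (0:Int) < n := by omega
      have hfd : PySem.Int.floordiv n 10 = n / 10 := PySem.Int.floordiv_eq_ediv_of_pos (by omega)
      simp only [h, if_false]
      rw [ih _ _ (by rw [hfd]; positivity) (by have := pvDiv10Lt n hpos; omega)]

-- digit count of a nonnegative integer (0 digits for 0); proof-side helper
def pvDg (n : Int) : Nat :=
  if n ≤ 0 then 0 else pvDg (n / 10) + 1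
termination_by n.toNat
decreasing_by omega

lemma pvDg_zero : pvDg 0 = 0 := by unfold pvDg; simp

lemma pvDg_pos (n : Int) (h : 0 < n) : pvDg n = pvDg (n / 10) + 1 := by
  rw [pvDg]; simp [not_le.mpr h]

-- the rev component of A's first loop ignores zeros/isdiv
lemma pvRevW_fst (rhs rev z z' : Int) (b b' : Bool) :
    (pvRevW rhs rev z b).1 = (pvRevW rhs rev z' b').1 := by
  by_cases h0 : rhs ≤ 0
  · simp [pvRevW, h0]
  · conv_lhs => rw [pvRevW]
    conv_rhs => rw [pvRevW]
    simp only [h0, if_false]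
    exact pvRevW_fst _ _ _ _ _ _
termination_by rhs.toNat
decreasing_by exact pvDiv10Lt _ (by omega)

-- the rev component stays nonnegative
lemma pvRevW_fst_nonneg (rhs : Int) : ∀ (rev z : Int) (b : Bool), 0 ≤ rev →
    0 ≤ (pvRevW rhs rev z b).1 := by
  intro rev z b hrev
  by_cases h0 : rhs ≤ 0
  · simp [pvRevW, h0]; omega
  · have hm : 0 ≤ PySem.Int.mod rhs 10 := PySem.Int.mod_nonneg _ (by omega)
    rw [pvRevW]
    simp only [h0, if_false]
    exact pvRevW_fst_nonneg _ _ _ _ (by omega)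
termination_by rhs.toNat
decreasing_by exact pvDiv10Lt _ (by omega)

-- with the flag already false, the zeros counter is frozen
lemma pvRevW_snd_false (rhs rev z : Int) :
    (pvRevW rhs rev z false).2 = z := by
  by_cases h0 : rhs ≤ 0
  · simp [pvRevW, h0]
  · rw [pvRevW]
    simp only [h0, if_false, Bool.false_and, Bool.false_eq_true, if_false]
    exact pvRevW_snd_false _ _ _
termination_by rhs.toNat
decreasing_by exact pvDiv10Lt _ (by omega)

-- a flag 'true' behaves like the recomputed flag 'mod rhs 10 = 0'
lemma pvRevW_true_flag (rhs rev z : Int) :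
    pvRevW rhs rev z true = pvRevW rhs rev z (decide (PySem.Int.mod rhs 10 = 0)) := by
  by_cases h0 : rhs ≤ 0
  · conv_lhs => rw [pvRevW]
    conv_rhs => rw [pvRevW]
    simp [h0]
  · conv_lhs => rw [pvRevW]
    conv_rhs => rw [pvRevW]
    simp only [h0, if_false, Bool.true_and, Bool.and_self]

-- replaying a single digit 0 < r < 10
lemma pvUnrevW_small (lhs r : Int) (h1 : 0 < r) (h2 : r < 10) :
    pvUnrevW lhs r = lhs * 10 + r := by
  have hm : PySem.Int.mod r 10 = r := by
    rw [PySem.Int.mod_eq_emod_of_pos (by omega)]; omega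
  have hf : PySem.Int.floordiv r 10 = 0 := by
    rw [PySem.Int.floordiv_eq_ediv_of_pos (by omega)]; omega
  rw [pvUnrevW, if_neg (by omega), hm, hf, pvUnrevW]
  norm_num

-- the key replay lemma: unrolling the reversed digits of n back onto lhs
lemma pvUnrev_rev (n : Int) (hn : 0 ≤ n) : ∀ (acc lhs : Int), 0 < acc →
    pvUnrevW lhs (pvRevW n acc 0 false).1
      = pvUnrevW (lhs * 10 ^ pvDg n + n) acc := by
  intro acc lhs hacc
  by_cases h0 : n = 0
  · rw [h0]
    rw [pvRevW]; simp [pvDg_zero]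
  · have hpos : 0 < n := by omega
    have hd0 : PySem.Int.mod n 10 = n % 10 :=
      PySem.Int.mod_eq_emod_of_pos (by omega)
    have hfd : PySem.Int.floordiv n 10 = n / 10 :=
      PySem.Int.floordiv_eq_ediv_of_pos (by omega)
    rw [pvRevW]
    simp only [if_neg (by omega : ¬ n ≤ 0), Bool.false_and, Bool.false_eq_true, if_false]
    rw [hd0, hfd]
    have hrec := pvUnrev_rev (n / 10) (by omega) (acc * 10 + n % 10) lhs
      (by have := Int.emod_nonneg n (by omega : (10:Int) ≠ 0); omega)
    rw [hrec]
    -- unfold one step of pvUnrevW with second argument acc*10 + n%10 > 0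
    have hmod : 0 ≤ n % 10 ∧ n % 10 < 10 := by
      constructor
      · exact Int.emod_nonneg n (by omega)
      · exact Int.emod_lt_of_pos n (by omega)
    rw [pvUnrevW]
    have hne : ¬ (acc * 10 + n % 10 ≤ 0) := by omega
    simp only [hne, if_false]
    have hm2 : PySem.Int.mod (acc * 10 + n % 10) 10 = n % 10 := by
      rw [PySem.Int.mod_eq_emod_of_pos (by omega)]; omega
    have hf2 : PySem.Int.floordiv (acc * 10 + n % 10) 10 = acc := by
      rw [PySem.Int.floordiv_eq_ediv_of_pos (by omega)]; omega
    rw [hm2, hf2]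
    congr 1
    rw [pvDg_pos n hpos]
    have h : n / 10 * 10 + n % 10 = n := by omega
    ring_nf
    linarith [h]
termination_by n.toNat
decreasing_by omega

-- the whole of A's post-branch computation, with the zeros counter generalized
lemma pvA_main (n : Int) (hn : 0 < n) : ∀ (z lhs : Int), 0 ≤ z →
    (pvUnrevW lhs (pvRevW n 0 z (decide (PySem.Int.mod n 10 = 0))).1)
        * 10 ^ ((pvRevW n 0 z (decide (PySem.Int.mod n 10 = 0))).2).toNat
      = (lhs * 10 ^ pvDg n + n) * 10 ^ z.toNat := by
  intro z lhs hz
  have hd0 : PySem.Int.mod n 10 = n % 10 := PySem.Int.mod_eq_emod_of_pos (by omega)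
  have hfd : PySem.Int.floordiv n 10 = n / 10 := PySem.Int.floordiv_eq_ediv_of_pos (by omega)
  have hmod : 0 ≤ n % 10 ∧ n % 10 < 10 :=
    ⟨Int.emod_nonneg n (by omega), Int.emod_lt_of_pos n (by omega)⟩
  by_cases hd : n % 10 = 0
  · -- trailing zero: one step keeps acc = 0, increments z
    have hge : 10 ≤ n := by omega
    have hq : 0 < n / 10 := by omega
    rw [pvRevW]
    simp only [if_neg (by omega : ¬ n ≤ 0)]
    rw [hd0, hfd]
    simp only [hd, decide_true, Bool.and_self, if_pos]
    norm_num
    rw [pvRevW_true_flag]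
    have := pvA_main (n / 10) hq (z + 1) lhs (by omega)
    rw [this]
    rw [pvDg_pos n hn]
    have hzt : (z + 1).toNat = z.toNat + 1 := by omega
    rw [hzt, pow_succ, pow_succ]
    have hne : n = n / 10 * 10 := by omega
    linear_combination (-(10:Int) ^ z.toNat) * hne
  · -- last digit nonzero: the flag goes false, zeros stays z
    rw [pvRevW]
    simp only [if_neg (by omega : ¬ n ≤ 0)]
    rw [hd0, hfd]
    simp only [hd, decide_false, Bool.and_false, Bool.false_eq_true, if_false]
    norm_num
    rw [pvRevW_snd_false]
    rw [pvRevW_fst (n/10) (n % 10) z 0 false false]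
    rw [pvUnrev_rev (n / 10) (by omega) (n % 10) lhs (by omega)]
    rw [pvUnrevW_small _ _ (by omega) (by omega)]
    rw [pvDg_pos n hn, pow_succ]
    have h : n / 10 * 10 + n % 10 = n := by omega
    linear_combination ((10:Int) ^ z.toNat) * h
termination_by n.toNat
decreasing_by omega

-- B's digit-count loop computes pvDg (shifted by the accumulator)
lemma pvCntW_eq (n : Int) (hn : 0 < n) : ∀ d : Int,
    pvCntW n d = d - 1 + (pvDg n : Int) := by
  intro d
  by_cases h : n < 10
  · rw [pvCntW]
    simp only [if_pos h]
    rw [pvDg_pos n hn]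
    have : n / 10 ≤ 0 := by omega
    rw [pvDg]
    simp [this]
  · rw [pvCntW]
    simp only [if_neg h]
    rw [PySem.Int.floordiv_eq_ediv_of_pos (by omega : (0:Int) < 10)]
    rw [pvCntW_eq (n / 10) (by omega) (d + 1)]
    rw [pvDg_pos n hn]
    push_cast
    ring
termination_by n.toNat
decreasing_by omega

-- ===== VERDICT (by name: the statement is the Claim_ definition above) =====
theorem concantenate_numbers_spec : Claim_equal_concantenate_numbers := by
  intro lhs rhs _ hpre
  unfold Spec_concantenate_numbers concantenate_numbers concantenate_numbers_alt
  have hpre' : (0:Int) ≤ rhs := hpre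
  rw [pvCntLoopB_eq_W _ _ _ hpre' (by omega)]
  by_cases h0 : rhs = 0
  · subst h0
    rw [pvCntW]
    norm_num
  · have hpos : 0 < rhs := by omega
    simp only [if_neg h0]
    rw [pvRevLoopA_eq_W _ _ _ _ _ hpre' (by omega)]
    rw [pvUnrevLoopA_eq_W _ _ _ (pvRevW_fst_nonneg _ _ _ _ le_rfl) (by omega)]
    have := pvA_main rhs hpos 0 lhs (by omega)
    simp only [Int.toNat_zero, pow_zero, mul_one] at this
    rw [this, pvCntW_eq rhs hpos 1]
    have ht : ((1:Int) - 1 + (pvDg rhs : Int)).toNat = pvDg rhs := by omega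
    rw [ht]
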